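-- pv_equiv track=rewrite | github.com/ChaeYami/CodingTest_Prac | Aug/0803.py | solution
-- ===== SOURCE A (Python) =====
-- def solution(s):
--    answer = 0
--    cnt1=0; cnt2=0
--    for i in s:
--        if cnt1==cnt2:
--            answer+=1
--            k=i
--        if k==i:
--            cnt1+=1
--        else:
--            cnt2+=1
--
--    return answer
-- ===== SOURCE B (Python) =====
-- def _first_group_len(s, p):
--     # length of the group starting at position p: the shortest prefix of s[p:]
--     # in which the count of the leading character is exactly half the prefix length
--     k = s[p]
--     m = 0
--     for i in range(p, len(s)):
--         if s[i] == k: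
--             m += 1
--         if i - p + 1 == 2 * m:
--             return i - p + 1
--     return len(s) - p
--
--
-- def solution(s):
--     groups = []
--     p = 0
--     while p < len(s):
--         g = _first_group_len(s, p)
--         groups.append(g)
--         p += g
--     return len(groups)
-- ===== Notes on version B (the rewrite author's own statement) =====
-- stated objective: alternative
-- what changed: B explicitly splits the string into its groups: a helper finds each group's length via a doubled match-count condition (prefix length == 2*matches of the leading char), the group lengths are collected into a list and its length is returned, instead of A's flat single pass with two never-reset counters and inline group-start detection.
import Mathlib
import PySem

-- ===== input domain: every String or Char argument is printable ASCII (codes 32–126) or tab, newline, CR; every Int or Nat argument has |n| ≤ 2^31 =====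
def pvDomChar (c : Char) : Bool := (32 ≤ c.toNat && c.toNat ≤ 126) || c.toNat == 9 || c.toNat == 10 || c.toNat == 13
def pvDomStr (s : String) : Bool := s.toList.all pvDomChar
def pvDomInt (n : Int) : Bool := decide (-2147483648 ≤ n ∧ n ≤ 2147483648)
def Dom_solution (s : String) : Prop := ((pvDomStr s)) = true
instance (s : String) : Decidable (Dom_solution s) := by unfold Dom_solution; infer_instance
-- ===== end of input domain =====

-- B splits the string explicitly into its groups (a helper computes each group's
-- length, the lengths are collected and counted) instead of A's flat single pass
-- with two never-reset counters; a different decomposition, same O(n) cost.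

-- ===== PORT A =====
-- state: (answer, cnt1, cnt2, k); Python's k is unassigned before the first char,
-- but it is always set there (cnt1 == cnt2 initially), so the initial ' ' is never read.
def pvStepA (st : Int × Int × Int × Char) (i : Char) : Int × Int × Int × Char :=
  let answer := st.1; let cnt1 := st.2.1; let cnt2 := st.2.2.1; let k := st.2.2.2
  let ak := if cnt1 = cnt2 then (answer + 1, i) else (answer, k)
  if ak.2 = i then (ak.1, cnt1 + 1, cnt2, ak.2) else (ak.1, cnt1, cnt2 + 1, ak.2)

def solution (s : String) : Int :=
  (s.toList.foldl pvStepA (0, 0, 0, ' ')).1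

-- ===== PORT B =====
-- _first_group_len of Source B: j chars of the group examined so far, m of them equal
-- to the key k; Python's index loop reading s[i] for increasing i is transcribed as
-- walking the remaining characters (the same reads in the same order); returns the
-- group length (j at exhaustion = len(s) - p of the Python).
def pvGlen (k : Char) (m j : Int) : List Char → Int
  | [] => j
  | c :: cs =>
    let m' := if c = k then m + 1 else m
    if j + 1 = 2 * m' then j + 1 else pvGlen k m' (j + 1) cs

-- the port of Source B's outer loop cites this for termination: a group has length ≥ 1
theorem pvGlen_ge (k : Char) : ∀ (l : List Char) (m j : Int), j ≤ pvGlen k m j l := by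
  intro l
  induction l with
  | nil => intro m j; simp [pvGlen]
  | cons c cs ih =>
    intro m j
    have ih1 := ih (m + 1) (j + 1)
    have ih2 := ih m (j + 1)
    simp only [pvGlen]
    split_ifs <;> omega

-- outer while-loop of Source B: collect the group lengths ('groups'), advancing by each
def pvCollect : List Char → List Int
  | [] => []
  | x :: xs =>
    pvGlen x 0 0 (x :: xs) :: pvCollect ((x :: xs).drop (pvGlen x 0 0 (x :: xs)).toNat)
termination_by l => l.length
decreasing_by
  have h1 : (1 : Int) ≤ pvGlen x 0 0 (x :: xs) := by
    have h2 := pvGlen_ge x xs 1 1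
    simp only [pvGlen]
    norm_num
    omega
  simp only [List.length_drop, List.length_cons]
  omega

def solution_alt (s : String) : Int := ((pvCollect s.toList).length : Int)

-- ===== PRECONDITION & SPEC =====
def Spec_solution (s : String) (out : Int) : Prop := out = solution_alt s
instance (s : String) (out : Int) : Decidable (Spec_solution s out) := by unfold Spec_solution; infer_instance

-- ===== CLAIM (what is proved, stated in full; the proofs are below) =====
def Claim_equal_solution : Prop := ∀ (s : String), Dom_solution s → Spec_solution s (solution s)

-- ===== LEMMAS AND PROOFS =====

-- Joint loop invariant. From a balanced state A's remaining fold adds exactly the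
-- number of groups of the rest of the string. From an unbalanced state (key k,
-- j chars of the current group seen, m of them matching the key, so
-- cnt1 - cnt2 = 2*m - j) it adds the number of groups left after the rest of the
-- current group — which B locates as the final pvGlen k m j l - j characters.
theorem pv_main : ∀ (l : List Char),
    (∀ (a c : Int) (k : Char),
      (l.foldl pvStepA (a, c, c, k)).1 = a + ((pvCollect l).length : Int)) ∧
    (∀ (a c1 c2 m j : Int) (k : Char), c1 ≠ c2 → c1 - c2 = 2 * m - j →
      (l.foldl pvStepA (a, c1, c2, k)).1
        = a + ((pvCollect (l.drop (pvGlen k m j l - j).toNat)).length : Int)) := by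
  intro l
  induction l with
  | nil =>
    refine ⟨by intro a c k; simp [pvCollect], ?_⟩
    intro a c1 c2 m j k h hb
    simp [pvGlen, pvCollect]
  | cons x xs ih =>
    constructor
    · -- balanced state: a new group starts at x with key x
      intro a c k
      have hstep : pvStepA (a, c, c, k) x = (a + 1, c + 1, c, x) := by
        simp [pvStepA]
      have hglen : pvGlen x 0 0 (x :: xs) = pvGlen x 1 1 xs := by
        simp [pvGlen]
      have hge : (1 : Int) ≤ pvGlen x 1 1 xs := pvGlen_ge x xs 1 1
      have hcol : pvCollect (x :: xs)
          = pvGlen x 1 1 xs :: pvCollect (xs.drop (pvGlen x 1 1 xs - 1).toNat) := by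
        rw [pvCollect, hglen]
        congr 1
        have : (pvGlen x 1 1 xs).toNat = (pvGlen x 1 1 xs - 1).toNat + 1 := by omega
        rw [this, List.drop_succ_cons]
      have h2 := ih.2 (a + 1) (c + 1) c 1 1 x (by omega) (by ring)
      rw [List.foldl_cons, hstep, h2, hcol, List.length_cons]
      push_cast
      ring
    · -- unbalanced state: still inside the current group with key k
      intro a c1 c2 m j k h hb
      have hm' : pvStepA (a, c1, c2, k) x
          = if x = k then (a, c1 + 1, c2, k) else (a, c1, c2 + 1, k) := by
        by_cases hx : x = k
        · subst hx
          simp [pvStepA, h]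
        · have hkx : ¬ k = x := fun hh => hx hh.symm
          simp [pvStepA, h, hx, hkx]
      by_cases hz : j + 1 = 2 * (if x = k then m + 1 else m)
      · -- the group ends after x: B returns length j+1, A's state rebalances
        have hglen : pvGlen k m j (x :: xs) = j + 1 := by
          simp only [pvGlen]
          rw [if_pos hz]
        have hdrop : ((x :: xs).drop ((j + 1) - j).toNat) = xs := by
          have h1 : ((j + 1) - j).toNat = 1 := by omega
          rw [h1, List.drop_succ_cons, List.drop_zero]
        rw [List.foldl_cons, hm', hglen, hdrop]
        by_cases hx : x = k
        · have hc : c1 + 1 = c2 := by rw [if_pos hx] at hz; omega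
          rw [if_pos hx]
          have := ih.1 a c2 k
          rw [hc]; exact this
        · have hc : c1 = c2 + 1 := by rw [if_neg hx] at hz; omega
          rw [if_neg hx]
          have := ih.1 a c1 k
          rw [hc] at this ⊢; exact this
      · -- still inside the group
        have hglen : pvGlen k m j (x :: xs)
            = pvGlen k (if x = k then m + 1 else m) (j + 1) xs := by
          simp only [pvGlen]
          rw [if_neg hz]
        have hge : j + 1 ≤ pvGlen k (if x = k then m + 1 else m) (j + 1) xs :=
          pvGlen_ge k xs _ (j + 1)
        have hdrop : ((x :: xs).drop (pvGlen k m j (x :: xs) - j).toNat)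
            = xs.drop (pvGlen k (if x = k then m + 1 else m) (j + 1) xs - (j + 1)).toNat := by
          rw [hglen]
          have : (pvGlen k (if x = k then m + 1 else m) (j + 1) xs - j).toNat
              = (pvGlen k (if x = k then m + 1 else m) (j + 1) xs - (j + 1)).toNat + 1 := by
            omega
          rw [this, List.drop_succ_cons]
        rw [List.foldl_cons, hm', hdrop]
        by_cases hx : x = k
        · rw [if_pos hx]
          have hz' : c1 + 1 ≠ c2 := by rw [if_pos hx] at hz; omega
          have hb' : (c1 + 1) - c2 = 2 * (m + 1) - (j + 1) := by omega
          have := ih.2 a (c1 + 1) c2 (m + 1) (j + 1) k hz' hb'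
          rw [this, if_pos hx]
        · rw [if_neg hx]
          have hz' : c1 ≠ c2 + 1 := by rw [if_neg hx] at hz; omega
          have hb' : c1 - (c2 + 1) = 2 * m - (j + 1) := by omega
          have := ih.2 a c1 (c2 + 1) m (j + 1) k hz' hb'
          rw [this, if_neg hx]

-- ===== VERDICT (by name: the statement is the Claim_ definition above) =====
theorem solution_spec : Claim_equal_solution := by
  intro s _
  unfold Spec_solution solution solution_alt
  have h := (pv_main s.toList).1 0 0 ' '
  rw [h]; ring
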